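-- pv_equiv track=rewrite | github.com/irahorecka/barcode-levenshtein-search | scripts/exhauste_missing_nt.py | recursively_swap_char
-- ===== SOURCE A (Python) =====
-- def recursively_swap_char(char_iter, search_char, replace_char):
--     """
--     IN: ['YFG1', 'AGGCG--TTC']
--     OUT: (['YFG1', 'AGGCGTTC'], ['YFG1', 'AGGCGNTTC'], ['YFG1', 'AGGCGNNTTC'])
--     where '-' is search_char and 'N' is replace_char
--
--     Args:
--         char_iter ([type]): [description]
--         search_char ([type]): [description]
--         replace_char ([type]): [description]
--     """
--
--     def recurse(char_iter, collection):
--         if search_char in char_iter: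
--             char_iter = replace_char.join(char_iter.split(search_char, 1))
--             # Remove `search_char` from  trimmed iterable and add to `collection`
--             stripped_char_iter = "".join(char for char in char_iter if char != search_char)
--             collection.append(stripped_char_iter)
--             # Pipe untrimmed `char_iter` for subsequent round of replace and trim
--             return recurse(char_iter, collection)
--         # First item should be stripped of replace_char and prepended to iterable
--         if replace_char in collection[0]:
--             collection.insert(0, collection[0].replace(replace_char, ""))
--         return collection
--
--     return recurse(char_iter, list())
-- ===== SOURCE B (Python) =====
-- def recursively_swap_char(char_iter, search_char, replace_char):
--     pieces = char_iter.split(search_char)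
--     collection = [
--         replace_char.join(pieces[: k + 1]) + "".join(pieces[k + 1 :])
--         for k in range(1, len(pieces))
--     ]
--     if replace_char in collection[0]:
--         collection.insert(0, collection[0].replace(replace_char, ""))
--     return collection
-- ===== Notes on version B (the rewrite author's own statement) =====
-- stated objective: simpler
-- what changed: A's recursive helper repeatedly replaces the first occurrence of search_char and re-scans the whole string each round; B splits the source once on search_char and builds every variant directly as 'first k+1 pieces joined with replace_char plus the remaining pieces concatenated'.
-- outside the precondition, e.g. on recursively_swap_char('aabb', 'ab', ''): A returns ['ab', 'ab', ''], B returns ['ab', 'ab']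
import Mathlib
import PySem

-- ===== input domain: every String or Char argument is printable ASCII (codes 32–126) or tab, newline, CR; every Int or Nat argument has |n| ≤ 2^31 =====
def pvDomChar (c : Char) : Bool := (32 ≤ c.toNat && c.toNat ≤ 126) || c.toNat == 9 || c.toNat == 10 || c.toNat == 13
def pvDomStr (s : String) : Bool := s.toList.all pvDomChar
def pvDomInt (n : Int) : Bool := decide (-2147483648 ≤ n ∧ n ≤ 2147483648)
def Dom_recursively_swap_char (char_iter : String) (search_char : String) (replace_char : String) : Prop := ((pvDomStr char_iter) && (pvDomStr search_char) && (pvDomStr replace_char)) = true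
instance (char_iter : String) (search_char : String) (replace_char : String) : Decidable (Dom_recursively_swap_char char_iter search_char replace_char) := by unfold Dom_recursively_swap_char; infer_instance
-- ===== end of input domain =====

-- B replaces A's recursive repeated first-occurrence replacement by one split of the source plus a
-- direct construction of each variant (objective: simpler, same cost).


-- ===== PORT A =====
-- the tail of A's `recurse`: `if replace_char in collection[0]: collection.insert(0, collection[0].replace(replace_char, ""))`
def pvFinalA (replace_char : String) (collection : List String) : List String :=
  match PySem.List.pyGet? collection 0 with
  | none => collection           -- Python: IndexError on collection[0] (excluded by Pre_)
  | some first =>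
    if PySem.Chars.isIn replace_char.toList first.toList then
      String.ofList (PySem.Chars.replace first.toList replace_char.toList []) :: collection
    else collection

-- the inner `recurse` of A; the fuel only bounds the recursion depth (under Pre_ it never runs out,
-- since each round removes one occurrence of the search character)
def pvRecurseA (search_char replace_char : String) : Nat → List Char → List String → List String
  | 0, _, collection => collection    -- fuel exhausted: Python recurses forever there (outside Pre_)
  | fuel + 1, char_iter, collection =>
    if PySem.Chars.isIn search_char.toList char_iter then
      match PySem.Chars.splitMax? char_iter search_char.toList 1 with
      | none => collection            -- Python: ValueError from split("", 1) (excluded by Pre_)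
      | some parts =>
        let char_iter' := PySem.Chars.join replace_char.toList parts
        let stripped := char_iter'.filter (fun ch => decide ([ch] ≠ search_char.toList))
        pvRecurseA search_char replace_char fuel char_iter' (collection ++ [String.ofList stripped])
    else pvFinalA replace_char collection

def recursively_swap_char (char_iter : String) (search_char : String) (replace_char : String) : List String :=
  pvRecurseA search_char replace_char (char_iter.toList.length + 1) char_iter.toList []

-- ===== PORT B =====
def recursively_swap_char_alt (char_iter : String) (search_char : String) (replace_char : String) : List String :=
  match PySem.Chars.split? char_iter.toList search_char.toList with
  | none => []                   -- Python: ValueError from split("") (excluded by Pre_)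
  | some pieces =>
    let collection := (PySem.List.pyRange 1 pieces.length).map (fun k =>
      String.ofList (PySem.Chars.join replace_char.toList (PySem.List.slice pieces none (some (k + 1))) ++
                 PySem.Chars.join [] (PySem.List.slice pieces (some (k + 1)) none)))
    -- `if replace_char in collection[0]: collection.insert(0, collection[0].replace(replace_char, ""))`
    match PySem.List.pyGet? collection 0 with
    | none => collection         -- Python: IndexError on collection[0] (excluded by Pre_)
    | some first =>
      if PySem.Chars.isIn replace_char.toList first.toList then
        String.ofList (PySem.Chars.replace first.toList replace_char.toList []) :: collection
      else collection

-- ===== PRECONDITION & SPEC =====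
-- Pre_ admits a single-character search_char occurring in char_iter and not in replace_char
-- (A then removes one occurrence per round and terminates), or a multi-character search_char
-- occurring exactly once whose substitution creates no new occurrence (A does one round).
-- Excluded: inputs where A raises (ValueError for empty search_char, IndexError when it is absent)
-- or recurses forever, and the defensible multi-character corner in which a replaced occurrence
-- leaves further occurrences behind — there A's per-character strip cannot fire, so A keeps the
-- remaining markers inside earlier variants while B uniformly drops them.
def Pre_recursively_swap_char (char_iter : String) (search_char : String) (replace_char : String) : Prop :=
  (search_char.toList.length = 1 ∧ search_char.toList.headD ' ' ∈ char_iter.toList ∧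
     replace_char.toList.contains (search_char.toList.headD ' ') = false) ∨
  (2 ≤ search_char.toList.length ∧ 0 ≤ PySem.Chars.find char_iter.toList search_char.toList ∧
     PySem.Chars.isIn search_char.toList
       (char_iter.toList.take (PySem.Chars.find char_iter.toList search_char.toList).toNat ++
        replace_char.toList ++
        char_iter.toList.drop ((PySem.Chars.find char_iter.toList search_char.toList).toNat +
          search_char.toList.length)) = false)
instance (char_iter : String) (search_char : String) (replace_char : String) : Decidable (Pre_recursively_swap_char char_iter search_char replace_char) := by unfold Pre_recursively_swap_char; infer_instance

def pvWitness_recursively_swap_char : String × String × String := ("AGGCG--TTC", "-", "N")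

def Spec_recursively_swap_char (char_iter : String) (search_char : String) (replace_char : String) (out : List String) : Prop := out = recursively_swap_char_alt char_iter search_char replace_char
instance (char_iter : String) (search_char : String) (replace_char : String) (out : List String) : Decidable (Spec_recursively_swap_char char_iter search_char replace_char out) := by unfold Spec_recursively_swap_char; infer_instance

-- ===== CLAIM (what is proved, stated in full; the proofs are below) =====
def Claim_equal_recursively_swap_char : Prop := ∀ (char_iter : String) (search_char : String) (replace_char : String), Dom_recursively_swap_char char_iter search_char replace_char → Pre_recursively_swap_char char_iter search_char replace_char → Spec_recursively_swap_char char_iter search_char replace_char (recursively_swap_char char_iter search_char replace_char)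

-- ===== LEMMAS AND PROOFS =====

-- proof-side structural single-character split (pieces in order, separators removed)
def pvSplitC (c : Char) : List Char → List (List Char)
  | [] => [[]]
  | x :: xs =>
    let r := pvSplitC c xs
    if x = c then [] :: r else (x :: r.headD []) :: r.tail

theorem pvSplitC_ne_nil (c : Char) (l : List Char) : pvSplitC c l ≠ [] := by
  induction l with
  | nil => simp [pvSplitC]
  | cons x xs ih => by_cases h : x = c <;> simp [pvSplitC, h]

theorem pvSplitC_cfree (c : Char) (l : List Char) : ∀ p ∈ pvSplitC c l, c ∉ p := by
  induction l with
  | nil => simp [pvSplitC]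
  | cons x xs ih =>
    obtain ⟨q, qs, hq⟩ := List.exists_cons_of_ne_nil (pvSplitC_ne_nil c xs)
    have hqm : c ∉ q := ih q (by rw [hq]; exact List.mem_cons_self)
    by_cases h : x = c
    · simpa [pvSplitC, h] using ih
    · intro p hp
      simp only [pvSplitC, if_neg h, hq, List.headD, List.tail_cons] at hp
      rcases List.mem_cons.mp hp with hp | hp
      · rw [hp]
        simp only [List.mem_cons, not_or]
        exact ⟨fun hxc => h hxc.symm, hqm⟩
      · exact ih p (by rw [hq]; exact List.mem_cons_of_mem _ hp)

-- reconstruction: joining the pieces with the separator gives the string back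
theorem pvJoin_splitC (c : Char) (l : List Char) :
    PySem.Chars.join [c] (pvSplitC c l) = l := by
  induction l with
  | nil => simp [pvSplitC, PySem.Chars.join_singleton]
  | cons x xs ih =>
    obtain ⟨q, qs, hq⟩ := List.exists_cons_of_ne_nil (pvSplitC_ne_nil c xs)
    rw [hq] at ih
    by_cases h : x = c
    · rw [pvSplitC.eq_def]
      simp only [if_pos h, hq, PySem.Chars.join_cons_cons]
      rw [ih, h]; rfl
    · simp only [pvSplitC, if_neg h, hq]
      cases qs with
      | nil =>
        simp only [List.headD, List.tail, PySem.Chars.join_singleton] at ih ⊢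
        rw [ih]
      | cons r rs =>
        simp only [List.headD, List.tail, PySem.Chars.join_cons_cons] at ih ⊢
        simp only [List.cons_append]
        rw [ih]

theorem pvSplitC_length_le (c : Char) (l : List Char) :
    (pvSplitC c l).length ≤ l.length + 1 := by
  induction l with
  | nil => simp [pvSplitC]
  | cons x xs ih =>
    by_cases h : x = c
    · simpa [pvSplitC, h] using ih
    · simp only [pvSplitC, if_neg h, List.length_cons]
      have h1 := List.length_tail (l := pvSplitC c xs)
      omega

theorem pvSplitC_of_not_mem (c : Char) (l : List Char) (h : c ∉ l) :
    pvSplitC c l = [l] := by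
  induction l with
  | nil => simp [pvSplitC]
  | cons x xs ih =>
    have hx : x ≠ c := fun hx => h (by simp [hx])
    have := ih (fun hc => h (List.mem_cons_of_mem _ hc))
    simp [pvSplitC, hx, this]

-- inverse reconstruction on c-free pieces
theorem pvSplitC_join (c : Char) (p : List Char) (ps : List (List Char))
    (hp : c ∉ p) (hps : ∀ q ∈ ps, c ∉ q) :
    pvSplitC c (PySem.Chars.join [c] (p :: ps)) = p :: ps := by
  induction ps generalizing p with
  | nil => rw [PySem.Chars.join_singleton]; exact pvSplitC_of_not_mem c p hp
  | cons q qs ih =>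
    rw [PySem.Chars.join_cons_cons]
    have hq := ih q (hps q List.mem_cons_self) (fun r hr => hps r (List.mem_cons_of_mem _ hr))
    clear ih
    induction p with
    | nil => simp only [List.nil_append, List.singleton_append, pvSplitC, reduceIte, hq]
    | cons y ys ihp =>
      have hy : y ≠ c := fun h => hp (by simp [h])
      have hys := ihp (fun h => hp (List.mem_cons_of_mem _ h))
      simp only [List.cons_append, pvSplitC, if_neg hy, hys, List.headD, List.tail]

-- the first two pieces can be merged through the separator
theorem pvJoin_merge (rc a b : List Char) (ps : List (List Char)) :
    PySem.Chars.join rc (a :: b :: ps) = PySem.Chars.join rc ((a ++ rc ++ b) :: ps) := by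
  cases ps with
  | nil => rw [PySem.Chars.join_cons_cons, PySem.Chars.join_singleton, PySem.Chars.join_singleton]
  | cons r rs =>
    rw [PySem.Chars.join_cons_cons, PySem.Chars.join_cons_cons, PySem.Chars.join_cons_cons]
    simp

theorem pvJoin_nil_left (ps : List (List Char)) : PySem.Chars.join [] ps = ps.flatten := by
  induction ps with
  | nil => simp [PySem.Chars.join_nil]
  | cons q qs ih =>
    cases qs with
    | nil => simp [PySem.Chars.join_singleton]
    | cons r rs => rw [PySem.Chars.join_cons_cons, ih]; simp

-- a piece list whose first piece has the shape pre ++ q lets the prefix move out of the join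
theorem pvJoin_prepend (s pre q : List Char) (qs : List (List Char)) :
    PySem.Chars.join s ((pre ++ q) :: qs) = pre ++ PySem.Chars.join s (q :: qs) := by
  cases qs with
  | nil => rw [PySem.Chars.join_singleton, PySem.Chars.join_singleton]
  | cons r rs =>
    rw [PySem.Chars.join_cons_cons, PySem.Chars.join_cons_cons]
    simp

-- stripping the separator character from a joined c-free piece list flattens it
theorem pvFilter_join (c : Char) (ps : List (List Char)) (hps : ∀ p ∈ ps, c ∉ p) :
    (PySem.Chars.join [c] ps).filter (fun ch => decide ([ch] ≠ [c])) = ps.flatten := by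
  induction ps with
  | nil => simp [PySem.Chars.join_nil]
  | cons q qs ih =>
    have hq : q.filter (fun ch => decide ([ch] ≠ [c])) = q := by
      apply List.filter_eq_self.mpr
      intro a ha
      simp only [decide_eq_true_iff, ne_eq, List.cons.injEq, and_true]
      exact fun hac => (hps q List.mem_cons_self) (hac ▸ ha)
    cases qs with
    | nil => simpa [PySem.Chars.join_singleton] using hq
    | cons r rs =>
      rw [PySem.Chars.join_cons_cons, List.filter_append, List.filter_append, hq,
        ih (fun p hp => hps p (List.mem_cons_of_mem _ hp))]
      simp

-- characterization of PySem's split go-loops on a single-character separator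
theorem pvSplitOnGo (c : Char) : ∀ (l : List Char) (fuel : Nat), l.length < fuel →
    ∀ (cur : List Char) (acc : List (List Char)),
    PySem.Chars.splitOn.go [c] fuel l cur acc =
      acc.reverse ++ ((cur.reverse ++ (pvSplitC c l).headD []) :: (pvSplitC c l).tail) := by
  intro l
  induction l with
  | nil =>
    intro fuel hf cur acc
    match fuel, hf with
    | fuel + 1, _ => simp [PySem.Chars.splitOn.go, pvSplitC]
  | cons x xs ih =>
    intro fuel hf cur acc
    match fuel, hf with
    | fuel + 1, hf =>
      rw [PySem.Chars.splitOn.go]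
      by_cases h : x = c
      · have hpre : List.isPrefixOf [c] (x :: xs) = true := by simp [List.isPrefixOf, h]
        rw [if_pos hpre]
        have : List.drop [c].length (x :: xs) = xs := by simp
        rw [this, ih fuel (by simpa using Nat.lt_of_succ_lt_succ hf) [] (cur.reverse :: acc)]
        obtain ⟨q, qs, hq⟩ := List.exists_cons_of_ne_nil (pvSplitC_ne_nil c xs)
        simp [pvSplitC, h, hq]
      · have hpre : List.isPrefixOf [c] (x :: xs) = false := by
          simp [List.isPrefixOf]; exact fun hc => h hc.symm
        rw [if_neg (by simp [hpre])]
        rw [ih fuel (by simpa using Nat.lt_of_succ_lt_succ hf) (x :: cur) acc]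
        simp [pvSplitC, h]

-- PySem bridge: Python split on a single-character separator
theorem pvSplitOn_singleton (c : Char) (l : List Char) :
    PySem.Chars.splitOn l [c] = pvSplitC c l := by
  rw [PySem.Chars.splitOn, pvSplitOnGo c l (l.length + 1) (by omega) [] []]
  obtain ⟨q, qs, hq⟩ := List.exists_cons_of_ne_nil (pvSplitC_ne_nil c l)
  simp [hq]

-- no-occurrence: the go loop scans to the end
theorem pvGoNone (sep : List Char) : ∀ (l : List Char) (fuel : Nat), l.length < fuel →
    ¬ sep <:+: l → ∀ cur acc,
    PySem.Chars.splitOn.go sep fuel l cur acc = acc.reverse ++ [cur.reverse ++ l] := by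
  intro l
  induction l with
  | nil =>
    intro fuel hf _ cur acc
    match fuel, hf with
    | fuel + 1, _ => rw [PySem.Chars.splitOn.go]; simp; omega
  | cons x xs ih =>
    intro fuel hf hno cur acc
    match fuel, hf with
    | fuel + 1, hf =>
      rw [PySem.Chars.splitOn.go]
      rw [if_neg (by
        intro hpre
        exact hno ((List.isPrefixOf_iff_prefix.mp hpre).isInfix)), 
        ih fuel (by simpa using Nat.lt_of_succ_lt_succ hf)
          (fun h => hno (h.trans (List.suffix_cons x xs).isInfix)) (x :: cur) acc]
      simp

-- one occurrence: the go loop splits exactly once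
theorem pvGoOnce (sep : List Char) (hsep : sep ≠ []) (b : List Char) (hb : ¬ sep <:+: b) :
    ∀ (a : List Char), (∀ i < a.length, ¬ sep <+: (a.drop i ++ sep ++ b)) →
    ∀ (fuel : Nat), (a ++ sep ++ b).length < fuel → ∀ cur acc,
    PySem.Chars.splitOn.go sep fuel (a ++ sep ++ b) cur acc =
      acc.reverse ++ [cur.reverse ++ a, b] := by
  intro a
  induction a with
  | nil =>
    intro _ fuel hf cur acc
    obtain ⟨s0, stl, rfl⟩ := List.exists_cons_of_ne_nil hsep
    match fuel, hf with
    | fuel + 1, hf =>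
      simp only [List.nil_append, List.cons_append]
      rw [PySem.Chars.splitOn.go,
        if_pos (List.isPrefixOf_iff_prefix.mpr (by simpa using List.prefix_append (s0 :: stl) b))]
      rw [show List.drop (s0 :: stl).length (s0 :: (stl ++ b)) = b by
        simpa using List.drop_left (s0 :: stl) b]
      rw [pvGoNone (s0 :: stl) b fuel (by simp at hf ⊢; omega) hb [] (cur.reverse :: acc)]
      simp
  | cons x a' ih =>
    intro ha fuel hf cur acc
    match fuel, hf with
    | fuel + 1, hf =>
      simp only [List.cons_append]
      rw [PySem.Chars.splitOn.go,
        if_neg (by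
          intro hpre
          exact ha 0 (by simp) (by simpa using List.isPrefixOf_iff_prefix.mp hpre))]
      rw [ih (fun i hi => by simpa using ha (i + 1) (by simpa using Nat.succ_lt_succ hi))
        fuel (by simp at hf ⊢; omega) (x :: cur) acc]
      simp

theorem pvGoMax0Gen (sep : List Char) : ∀ (fuel : Nat) (l cur : List Char) (acc : List (List Char)),
    PySem.Chars.splitOnMax.go sep fuel 0 l cur acc = acc.reverse ++ [cur.reverse ++ l] := by
  intro fuel l cur acc
  cases fuel with
  | zero => rw [PySem.Chars.splitOnMax.go]; simp
  | succ fuel =>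
    cases l with
    | nil => rw [PySem.Chars.splitOnMax.go]; simp; omega
    | cons x rest => rw [PySem.Chars.splitOnMax.go]; simp

theorem pvGoMaxOnce (sep : List Char) (hsep : sep ≠ []) (b : List Char) :
    ∀ (a : List Char), (∀ i < a.length, ¬ sep <+: (a.drop i ++ sep ++ b)) →
    ∀ (fuel : Nat), (a ++ sep ++ b).length < fuel → ∀ cur acc,
    PySem.Chars.splitOnMax.go sep fuel 1 (a ++ sep ++ b) cur acc =
      acc.reverse ++ [cur.reverse ++ a, b] := by
  intro a
  induction a with
  | nil =>
    intro _ fuel hf cur acc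
    obtain ⟨s0, stl, rfl⟩ := List.exists_cons_of_ne_nil hsep
    match fuel, hf with
    | fuel + 1, hf =>
      simp only [List.nil_append, List.cons_append]
      rw [PySem.Chars.splitOnMax.go, if_neg (by omega),
        if_pos (List.isPrefixOf_iff_prefix.mpr (by simpa using List.prefix_append (s0 :: stl) b))]
      rw [show List.drop (s0 :: stl).length (s0 :: (stl ++ b)) = b by
        simpa using List.drop_left (s0 :: stl) b]
      show PySem.Chars.splitOnMax.go (s0 :: stl) fuel 0 b [] (cur.reverse :: acc) = _
      rw [pvGoMax0Gen]
      simp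
  | cons x a' ih =>
    intro ha fuel hf cur acc
    match fuel, hf with
    | fuel + 1, hf =>
      simp only [List.cons_append]
      rw [PySem.Chars.splitOnMax.go, if_neg (by omega),
        if_neg (by
          intro hpre
          exact ha 0 (by simp) (by simpa using List.isPrefixOf_iff_prefix.mp hpre))]
      rw [ih (fun i hi => by simpa using ha (i + 1) (by simpa using Nat.succ_lt_succ hi))
        fuel (by simp at hf ⊢; omega) (x :: cur) acc]
      simp

-- top-level forms
theorem pvSplitOn_two (sep : List Char) (hsep : sep ≠ []) (a b : List Char)
    (ha : ∀ i < a.length, ¬ sep <+: (a.drop i ++ sep ++ b)) (hb : ¬ sep <:+: b) :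
    PySem.Chars.splitOn (a ++ sep ++ b) sep = [a, b] := by
  rw [PySem.Chars.splitOn, pvGoOnce sep hsep b hb a ha _ (by omega) [] []]
  simp

theorem pvSplitOnMax_two (sep : List Char) (hsep : sep ≠ []) (a b : List Char)
    (ha : ∀ i < a.length, ¬ sep <+: (a.drop i ++ sep ++ b)) :
    PySem.Chars.splitOnMax (a ++ sep ++ b) sep 1 = [a, b] := by
  rw [PySem.Chars.splitOnMax, if_neg (by omega),
    show (1 : Int).toNat = 1 from rfl,
    pvGoMaxOnce sep hsep b a ha _ (by omega) [] []]
  simp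

-- the per-character strip is a no-op for a multi-character search string
theorem pvSplitOnMaxGo1 (c : Char) : ∀ (l : List Char) (fuel : Nat), l.length < fuel → c ∈ l →
    ∀ (cur : List Char) (acc : List (List Char)),
    PySem.Chars.splitOnMax.go [c] fuel 1 l cur acc =
      acc.reverse ++ [cur.reverse ++ (pvSplitC c l).headD [],
        PySem.Chars.join [c] (pvSplitC c l).tail] := by
  intro l
  induction l with
  | nil => intro _ _ hc; simp at hc
  | cons x xs ih =>
    intro fuel hf hc cur acc
    match fuel, hf with
    | fuel + 1, hf =>
      rw [PySem.Chars.splitOnMax.go]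
      rw [if_neg (by omega)]
      by_cases h : x = c
      · have hpre : List.isPrefixOf [c] (x :: xs) = true := by simp [List.isPrefixOf, h]
        rw [if_pos hpre]
        have hd : List.drop [c].length (x :: xs) = xs := by simp
        rw [hd]
        show PySem.Chars.splitOnMax.go [c] fuel 0 xs [] (cur.reverse :: acc) = _
        rw [pvGoMax0Gen]
        obtain ⟨q, qs, hq⟩ := List.exists_cons_of_ne_nil (pvSplitC_ne_nil c xs)
        have hj : PySem.Chars.join [c] (q :: qs) = xs := by rw [← hq, pvJoin_splitC]
        simp [pvSplitC, h, hq, hj]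
      · have hpre : List.isPrefixOf [c] (x :: xs) = false := by
          simp [List.isPrefixOf]; exact fun hc' => h hc'.symm
        rw [if_neg (by simp [hpre])]
        have hcxs : c ∈ xs := by
          rcases List.mem_cons.mp hc with h' | h'
          · exact absurd h'.symm h
          · exact h'
        rw [ih fuel (by simpa using Nat.lt_of_succ_lt_succ hf) hcxs (x :: cur) acc]
        simp [pvSplitC, h]

-- PySem bridge: Python split(sep, 1) on a single-character separator that occurs
theorem pvSplitOnMax_one (c : Char) (l : List Char) (h : c ∈ l) :
    PySem.Chars.splitOnMax l [c] 1 =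
      [(pvSplitC c l).headD [], PySem.Chars.join [c] (pvSplitC c l).tail] := by
  rw [PySem.Chars.splitOnMax]
  rw [if_neg (by omega)]
  have h1 : (1 : Int).toNat = 1 := rfl
  rw [h1, pvSplitOnMaxGo1 c l (l.length + 1) (by omega) h [] []]
  simp

theorem pvIsIn_singleton_true (c : Char) (l : List Char) (h : c ∈ l) :
    PySem.Chars.isIn [c] l = true := by
  rw [PySem.Chars.isIn_iff_infix, List.singleton_infix_iff]; exact h

theorem pvIsIn_singleton_false (c : Char) (l : List Char) (h : c ∉ l) :
    PySem.Chars.isIn [c] l = false := by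
  rw [← Bool.not_eq_true, PySem.Chars.isIn_iff_infix, List.singleton_infix_iff]; exact h

theorem pvFilter_cfree (c : Char) (p : List Char) (h : c ∉ p) :
    p.filter (fun ch => decide ([ch] ≠ [c])) = p := by
  apply List.filter_eq_self.mpr
  intro a ha
  simp only [decide_eq_true_iff, ne_eq, List.cons.injEq, and_true]
  exact fun hac => h (hac ▸ ha)

-- the sequence of stripped variants produced by A's recursion
def pvVarList (rc : List Char) : List Char → List (List Char) → List String
  | _, [] => []
  | pre, q :: qs => String.ofList (pre ++ rc ++ q ++ qs.flatten) :: pvVarList rc (pre ++ rc ++ q) qs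

-- invariant of A's recursion
theorem pvRecurseA_invariant (c : Char) (sc rcS : String) (hsc : sc.toList = [c])
    (hrc : c ∉ rcS.toList) :
    ∀ (ps : List (List Char)) (pre : List Char) (fuel : Nat) (col : List String),
      c ∉ pre → (∀ p ∈ ps, c ∉ p) → ps.length < fuel →
      pvRecurseA sc rcS fuel (PySem.Chars.join [c] (pre :: ps)) col =
        pvFinalA rcS (col ++ pvVarList rcS.toList pre ps) := by
  intro ps
  induction ps with
  | nil =>
    intro pre fuel col hpre _ hf
    match fuel, hf with
    | fuel + 1, _ =>
      rw [PySem.Chars.join_singleton, pvRecurseA, hsc,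
        if_neg (by simp [pvIsIn_singleton_false c pre hpre])]
      simp [pvVarList]
  | cons q qs ih =>
    intro pre fuel col hpre hps hf
    match fuel, hf with
    | fuel + 1, hf =>
      have hcur : c ∈ PySem.Chars.join [c] (pre :: q :: qs) := by
        rw [PySem.Chars.join_cons_cons]; simp
      rw [pvRecurseA, hsc, if_pos (pvIsIn_singleton_true _ _ hcur)]
      rw [PySem.Chars.splitMax?, if_neg (by simp)]
      rw [pvSplitOnMax_one c _ hcur, pvSplitC_join c pre (q :: qs) hpre hps]
      simp only [List.headD, List.tail_cons]
      -- the new current string and its stripped form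
      have hq : c ∉ q := hps q List.mem_cons_self
      have hqs : ∀ p ∈ qs, c ∉ p := fun p hp => hps p (List.mem_cons_of_mem _ hp)
      have hjoin2 : PySem.Chars.join rcS.toList [pre, PySem.Chars.join [c] (q :: qs)] =
          pre ++ rcS.toList ++ PySem.Chars.join [c] (q :: qs) := by
        rw [PySem.Chars.join_cons_cons, PySem.Chars.join_singleton]
      have hshape : pre ++ rcS.toList ++ PySem.Chars.join [c] (q :: qs) =
          PySem.Chars.join [c] ((pre ++ rcS.toList ++ q) :: qs) := by
        have := pvJoin_prepend [c] (pre ++ rcS.toList) q qs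
        rw [this]
      have hstrip : (pre ++ rcS.toList ++ PySem.Chars.join [c] (q :: qs)).filter
          (fun ch => decide ([ch] ≠ [c])) = pre ++ rcS.toList ++ q ++ qs.flatten := by
        rw [List.filter_append, List.filter_append, pvFilter_cfree c pre hpre,
          pvFilter_cfree c rcS.toList hrc, pvFilter_join c (q :: qs) hps]
        simp
      simp only [hjoin2]
      rw [hstrip, hshape, ih (pre ++ rcS.toList ++ q) fuel (col ++ [String.ofList (pre ++ rcS.toList ++ q ++ qs.flatten)])
        (by simp only [List.mem_append, not_or]; exact ⟨⟨hpre, hrc⟩, hq⟩) hqs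
        (by simpa using Nat.lt_of_succ_lt_succ hf)]
      rw [pvVarList]
      simp

-- closed form of the variant list (B's construction)
theorem pvVarList_closed (rc : List Char) (pre : List Char) (qs : List (List Char)) :
    pvVarList rc pre qs = (List.range qs.length).map (fun i =>
      String.ofList (PySem.Chars.join rc (pre :: qs.take (i + 1)) ++ (qs.drop (i + 1)).flatten)) := by
  induction qs generalizing pre with
  | nil => simp [pvVarList]
  | cons q qs ih =>
    rw [pvVarList, ih (pre ++ rc ++ q), List.length_cons, List.range_succ_eq_map,
      List.map_cons, List.map_map]
    congr 1
    · rw [show (q :: qs).take (0 + 1) = [q] by simp, show (q :: qs).drop (0 + 1) = qs by simp,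
        PySem.Chars.join_cons_cons, PySem.Chars.join_singleton]
    · apply List.map_congr_left
      intro i _
      simp only [Function.comp_apply, List.take_succ_cons, List.drop_succ_cons]
      rw [pvJoin_merge]

-- Python's range(1, n + 1) for a Nat bound
theorem pvPyRange_one (n : Nat) :
    PySem.List.pyRange 1 ((n : Int) + 1) = (List.range n).map (fun (i : Nat) => ((i : Int) + 1)) := by
  induction n with
  | zero => decide
  | succ n ih =>
    rw [show ((n + 1 : Nat) : Int) + 1 = ((n : Int) + 1) + 1 by push_cast; ring,
      PySem.List.pyRange_one_succ_right (by omega), ih, List.range_succ, List.map_append]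
    simp

-- ===== VERDICT (by name: the statement is the Claim_ definition above) =====
theorem pvFilter_long (sep l : List Char) (h : 2 ≤ sep.length) :
    l.filter (fun ch => decide ([ch] ≠ sep)) = l := by
  apply List.filter_eq_self.mpr
  intro a _
  simp only [decide_eq_true_iff, ne_eq]
  intro heq
  rw [← heq] at h
  simp at h

theorem recursively_swap_char_spec : Claim_equal_recursively_swap_char := by
  unfold Claim_equal_recursively_swap_char
  intro ci sc rc _ hpre
  unfold Spec_recursively_swap_char
  rcases hpre with ⟨hlen, hmem, hnc⟩ | ⟨hlen2, hfind, hnomore0⟩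
  · -- single-character search_char
    obtain ⟨c, hsc⟩ : ∃ c, sc.toList = [c] := by
      match h : sc.toList, hlen with
      | [c], _ => exact ⟨c, rfl⟩
    rw [hsc] at hmem hnc
    simp only [List.headD] at hmem hnc
    have hnotin : c ∉ rc.toList := by
      simpa [List.contains_eq_mem] using hnc
    obtain ⟨p0, rest, hp⟩ := List.exists_cons_of_ne_nil (pvSplitC_ne_nil c ci.toList)
    have hp0 : c ∉ p0 := pvSplitC_cfree c ci.toList p0 (by rw [hp]; exact List.mem_cons_self)
    have hrest : ∀ p ∈ rest, c ∉ p := fun p hmp =>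
      pvSplitC_cfree c ci.toList p (by rw [hp]; exact List.mem_cons_of_mem _ hmp)
    have hj : PySem.Chars.join [c] (p0 :: rest) = ci.toList := by rw [← hp, pvJoin_splitC]
    have hflen : rest.length < ci.toList.length + 1 := by
      have := pvSplitC_length_le c ci.toList
      rw [hp] at this
      simp only [List.length_cons] at this
      omega
    -- A's side reduces to the invariant
    rw [recursively_swap_char,
      show ci.toList = PySem.Chars.join [c] (p0 :: rest) from hj.symm,
      pvRecurseA_invariant c sc rc hsc hnotin rest p0 _ [] hp0 hrest (by rwa [hj])]
    -- B's side
    rw [recursively_swap_char_alt, hsc, PySem.Chars.split?, if_neg (by simp),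
      pvSplitOn_singleton, hp]
    have hcol : (PySem.List.pyRange 1 ((p0 :: rest).length : Int)).map (fun k =>
        String.ofList (PySem.Chars.join rc.toList (PySem.List.slice (p0 :: rest) none (some (k + 1))) ++
          PySem.Chars.join [] (PySem.List.slice (p0 :: rest) (some (k + 1)) none))) =
        pvVarList rc.toList p0 rest := by
      rw [pvVarList_closed,
        show (((p0 :: rest).length : Nat) : Int) = (rest.length : Int) + 1 by simp,
        pvPyRange_one, List.map_map]
      symm
      apply List.map_congr_left
      intro i _
      simp only [Function.comp_apply]
      rw [PySem.List.slice_to _ (by omega), PySem.List.slice_from _ (by omega),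
        show ((i : Int) + 1 + 1).toNat = i + 2 by omega]
      rw [List.take_succ_cons, List.drop_succ_cons, pvJoin_nil_left]
    simp only [hcol, List.nil_append]
    rfl
  · -- multi-character search_char with a single occurrence
    have hspne : sc.toList ≠ [] := by
      intro h
      rw [h] at hlen2
      simp at hlen2
    set j := (PySem.Chars.find ci.toList sc.toList).toNat with hjdef
    have hspec := PySem.Chars.find_spec hfind
    obtain ⟨tl, htl⟩ := hspec.1
    have hjle : j ≤ ci.toList.length := by
      have := PySem.Chars.find_le_length ci.toList sc.toList
      omega
    have hl : ci.toList = ci.toList.take j ++ sc.toList ++ tl := by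
      conv_lhs => rw [← List.take_append_drop j ci.toList]
      rw [← htl, List.append_assoc]
    have haLen : (ci.toList.take j).length = j := by rw [List.length_take]; omega
    have hb : tl = ci.toList.drop (j + sc.toList.length) := by
      have h2 := congrArg (List.drop sc.toList.length) htl
      rw [List.drop_left, List.drop_drop] at h2
      rw [h2, Nat.add_comm]
    have hnoMore : ¬ sc.toList <:+: (ci.toList.take j ++ rc.toList ++ tl) := by
      have h0 := (PySem.Chars.isIn_eq_false_iff _ _).mp hnomore0
      rwa [← hb] at h0
    have hB : ¬ sc.toList <:+: tl := fun h =>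
      hnoMore (h.trans (List.suffix_append (ci.toList.take j ++ rc.toList) tl).isInfix)
    have hA : ∀ i < (ci.toList.take j).length,
        ¬ sc.toList <+: ((ci.toList.take j).drop i ++ sc.toList ++ tl) := by
      intro i hi
      have hev : (ci.toList.take j).drop i ++ sc.toList ++ tl = ci.toList.drop i := by
        conv_rhs => rw [hl, List.append_assoc, List.drop_append_of_le_length (by omega)]
        simp [List.append_assoc]
      rw [hev]
      exact hspec.2 i (by omega)
    have hIn : PySem.Chars.isIn sc.toList (ci.toList.take j ++ sc.toList ++ tl) = true :=
      (PySem.Chars.isIn_iff_infix _ _).mpr ⟨ci.toList.take j, tl, rfl⟩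
    -- A's side: one round of replacement, then the recursion stops
    have hAside : recursively_swap_char ci sc rc =
        pvFinalA rc [String.ofList (ci.toList.take j ++ rc.toList ++ tl)] := by
      rw [recursively_swap_char]
      conv_lhs => rw [hl]
      rw [pvRecurseA, if_pos hIn, PySem.Chars.splitMax?, if_neg (by simp [hspne]),
        pvSplitOnMax_two sc.toList hspne _ tl hA]
      simp only [PySem.Chars.join_cons_cons, PySem.Chars.join_singleton,
        pvFilter_long sc.toList _ hlen2]
      rw [show (ci.toList.take j ++ sc.toList ++ tl).length =
          ((ci.toList.take j ++ sc.toList ++ tl).length - 1) + 1 from by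
            have := List.length_pos_iff.mpr hspne
            simp only [List.length_append]
            omega,
        pvRecurseA, if_neg (by rw [(PySem.Chars.isIn_eq_false_iff _ _).mpr hnoMore]; simp)]
      simp only [List.nil_append]

    -- B's side: two pieces, one constructed variant
    have hBside : recursively_swap_char_alt ci sc rc =
        pvFinalA rc [String.ofList (ci.toList.take j ++ rc.toList ++ tl)] := by
      rw [recursively_swap_char_alt, PySem.Chars.split?, if_neg (by simp [hspne]),
        show PySem.Chars.splitOn ci.toList sc.toList = [ci.toList.take j, tl] from by
          conv_lhs => rw [hl]
          exact pvSplitOn_two sc.toList hspne _ tl hA hB]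
      simp only [List.length_cons, List.length_nil]
      rw [show PySem.List.pyRange 1 ((0 + 1 + 1 : Nat) : Int) = [1] from by decide]
      simp only [List.map_cons, List.map_nil]
      rw [PySem.List.slice_to _ (by omega), PySem.List.slice_from _ (by omega),
        show ((1 : Int) + 1).toNat = 2 from rfl,
        show List.take 2 [ci.toList.take j, tl] = [ci.toList.take j, tl] from rfl,
        show List.drop 2 ([ci.toList.take j, tl] : List (List Char)) = [] from rfl,
        PySem.Chars.join_cons_cons, PySem.Chars.join_singleton, PySem.Chars.join_nil,
        List.append_nil]
      rfl
    rw [hAside, hBside]
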